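-- pv_equiv track=rewrite | github.com/elghfz/costgraph | algos.py | calculate_cost_strategies
-- ===== SOURCE A (Python) =====
-- def calculate_cost_strategies(installations, frais_approvisionnement, cout_stockage):
--     n_months = len(installations)
--     total_cabines = sum(installations)
--
--     # strat 1 : tout au mois 1 (directeur des achats)
--     cout_achat_directeur_achats = frais_approvisionnement + total_cabines
--
--     # coût de stockage
--     cout_stockage_directeur_achats = 0
--     cabines_restantes = total_cabines
--     for i in range(n_months):
--         cabines_restantes -= installations[i]
--         cout_stockage_directeur_achats += cabines_restantes * cout_stockage
--
--     total_directeur_achats = cout_achat_directeur_achats + cout_stockage_directeur_achats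
--
--     # strat 2 : acheter chaque mois (directeur financier)
--     cout_directeur_financier = 0
--     for i in range(n_months):
--         cout_directeur_financier += frais_approvisionnement + installations[i]
--     # et donc pas de frais de stockage avec sa methode
--
--     return {
--         "directeur_achats": total_directeur_achats,
--         "directeur_financier": cout_directeur_financier
--     }
-- ===== SOURCE B (Python) =====
-- def calculate_cost_strategies(installations, frais_approvisionnement, cout_stockage):
--     n_months = len(installations)
--     total_cabines = sum(installations)
--     # month-weighted storage: the cabins installed in month i are stored i months
--     poids = sum(i * x for i, x in enumerate(installations))
--     return {
--         "directeur_achats": frais_approvisionnement + total_cabines + poids * cout_stockage,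
--         "directeur_financier": n_months * frais_approvisionnement + total_cabines,
--     }
-- ===== Notes on version B (the rewrite author's own statement) =====
-- stated objective: simpler
-- what changed: Replaces the running cabines_restantes subtraction loop by an index-weighted sum (i*installations[i]) multiplied once by cout_stockage, and replaces strat-2's loop by the closed form n_months*frais + total_cabines.
import Mathlib
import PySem

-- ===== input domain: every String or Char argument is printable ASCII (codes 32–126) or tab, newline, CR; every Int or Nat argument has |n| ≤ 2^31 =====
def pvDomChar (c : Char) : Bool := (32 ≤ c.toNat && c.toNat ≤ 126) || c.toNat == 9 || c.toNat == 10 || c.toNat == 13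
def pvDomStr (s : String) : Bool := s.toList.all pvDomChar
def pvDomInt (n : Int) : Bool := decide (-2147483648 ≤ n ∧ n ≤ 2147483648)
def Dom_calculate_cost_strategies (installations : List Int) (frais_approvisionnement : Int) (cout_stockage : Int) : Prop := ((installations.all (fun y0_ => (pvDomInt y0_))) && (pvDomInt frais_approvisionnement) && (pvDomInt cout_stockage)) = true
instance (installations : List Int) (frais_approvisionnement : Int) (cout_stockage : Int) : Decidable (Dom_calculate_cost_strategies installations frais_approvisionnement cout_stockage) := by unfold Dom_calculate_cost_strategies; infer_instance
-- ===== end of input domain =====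

-- B replaces the running cabines_restantes loop by an index-weighted sum times cout_stockage
-- and strat-2's loop by the closed form n*frais + total (objective: simpler).

-- ===== PORT A =====
def calculate_cost_strategies (installations : List Int) (frais_approvisionnement : Int) (cout_stockage : Int) : List (String × Int) :=
  let total_cabines := installations.sum
  let cout_achat_directeur_achats := frais_approvisionnement + total_cabines
  -- loop state = (cabines_restantes, cout_stockage_directeur_achats)
  let st := installations.foldl
    (fun (st : Int × Int) x => (st.1 - x, st.2 + (st.1 - x) * cout_stockage))
    (total_cabines, 0)
  let total_directeur_achats := cout_achat_directeur_achats + st.2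
  let cout_directeur_financier := installations.foldl
    (fun acc x => acc + (frais_approvisionnement + x)) 0
  [("directeur_achats", total_directeur_achats),
   ("directeur_financier", cout_directeur_financier)]

-- ===== PORT B =====
def calculate_cost_strategies_alt (installations : List Int) (frais_approvisionnement : Int) (cout_stockage : Int) : List (String × Int) :=
  let n_months : Int := installations.length
  let total_cabines := installations.sum
  let poids := (PySem.List.enumerate installations 0).foldl
    (fun acc p => acc + p.1 * p.2) 0
  [("directeur_achats", frais_approvisionnement + total_cabines + poids * cout_stockage),
   ("directeur_financier", n_months * frais_approvisionnement + total_cabines)]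

-- ===== PRECONDITION & SPEC =====
def Spec_calculate_cost_strategies (installations : List Int) (frais_approvisionnement : Int) (cout_stockage : Int) (out : List (String × Int)) : Prop := out = calculate_cost_strategies_alt installations frais_approvisionnement cout_stockage
instance (installations : List Int) (frais_approvisionnement : Int) (cout_stockage : Int) (out : List (String × Int)) : Decidable (Spec_calculate_cost_strategies installations frais_approvisionnement cout_stockage out) := by unfold Spec_calculate_cost_strategies; infer_instance

-- ===== CLAIM (what is proved, stated in full; the proofs are below) =====
def Claim_equal_calculate_cost_strategies : Prop := ∀ (installations : List Int) (frais_approvisionnement : Int) (cout_stockage : Int), Dom_calculate_cost_strategies installations frais_approvisionnement cout_stockage → Spec_calculate_cost_strategies installations frais_approvisionnement cout_stockage (calculate_cost_strategies installations frais_approvisionnement cout_stockage)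

-- ===== LEMMAS AND PROOFS =====

-- weight spec: g xs = sum over i of i * xs[i]
def pvWeight : List Int → Int
  | [] => 0
  | _ :: xs => pvWeight xs + xs.sum

theorem pv_fin_fold (xs : List Int) (f acc : Int) :
    xs.foldl (fun a x => a + (f + x)) acc = acc + (xs.length : Int) * f + xs.sum := by
  induction xs generalizing acc with
  | nil => simp
  | cons x xs ih => simp [List.foldl, ih]; push_cast; ring

theorem pv_stock_fold (xs : List Int) (c r s : Int) :
    (xs.foldl (fun (st : Int × Int) x => (st.1 - x, st.2 + (st.1 - x) * c)) (r, s)).2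
      = s + c * ((xs.length : Int) * (r - xs.sum) + pvWeight xs) := by
  induction xs generalizing r s with
  | nil => simp [pvWeight]
  | cons x xs ih => simp [List.foldl, ih, pvWeight]; push_cast; ring

theorem pv_enum_fold (xs : List Int) (k : Int) (a : Int) :
    (PySem.List.enumerate xs k).foldl (fun acc p => acc + p.1 * p.2) a
      = a + k * xs.sum + pvWeight xs := by
  induction xs generalizing k a with
  | nil => simp [PySem.List.enumerate_nil, pvWeight]
  | cons x xs ih => simp [PySem.List.enumerate_cons, ih, pvWeight]; ring

-- ===== VERDICT (by name: the statement is the Claim_ definition above) =====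
theorem calculate_cost_strategies_spec : Claim_equal_calculate_cost_strategies := by
  intro installations f c _
  unfold Spec_calculate_cost_strategies
  unfold calculate_cost_strategies calculate_cost_strategies_alt
  simp only [pv_fin_fold, pv_stock_fold, pv_enum_fold]
  refine congrArg₂ (fun u v => [("directeur_achats", u), ("directeur_financier", v)]) ?_ ?_ <;> ring
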